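-- pv_equiv track=rewrite | github.com/alonaharoni1/IntroEx11 | ex11_utils.py | find_length_n_paths_helper
-- ===== SOURCE A (Python) =====
-- from typing import List, Tuple, Iterable, Optional
--
-- Board = List[List[str]]
--
-- Path = List[Tuple[int, int]]
--
-- def get_valid_next_locations(location: Tuple[int, int], path: Path, height: int,
--                              width: int) -> List[Tuple[int, int]]:
--     y = location[0]
--     x = location[1]
--     next_locations = [(y + i, x + j) for j in range(-1, 2) for i in range(-1, 2)]
--     next_locations.remove((y, x))
--     if x == 0:
--         next_locations.remove((y - 1, x - 1))
--         next_locations.remove((y, x - 1))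
--         next_locations.remove((y + 1, x - 1))
--     elif x == width - 1:
--         next_locations.remove((y - 1, x + 1))
--         next_locations.remove((y, x + 1))
--         next_locations.remove((y + 1, x + 1))
--     if y == 0:
--         if (y - 1, x - 1) in next_locations: next_locations.remove(
--             (y - 1, x - 1))
--         if (y - 1, x) in next_locations: next_locations.remove((y - 1, x))
--         if (y - 1, x + 1) in next_locations: next_locations.remove(
--             (y - 1, x + 1))
--     elif y == height - 1:
--         if (y + 1, x - 1) in next_locations: next_locations.remove(
--             (y + 1, x - 1))
--         if (y + 1, x) in next_locations: next_locations.remove((y + 1, x))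
--         if (y + 1, x + 1) in next_locations: next_locations.remove(
--             (y + 1, x + 1))
--     # remove the locations that I already passed
--     for path_loc in path:
--         for next_loc in next_locations:
--             if path_loc == next_loc:
--                 next_locations.remove(next_loc)
--     return next_locations
--
-- def find_length_n_paths_helper(n: int, board: Board, words: Iterable[str],
--                                loc: Tuple[int, int]) -> List[Path]:
--     if n == 1:
--         return [[(loc[0], loc[1])]]
--     lst_to_return = []
--     lst_next_loc = get_valid_next_locations(loc, (), len(board), len(
--         board[0]))  # todo:add tupple later for checking if loc has been stept on
--     for next_loc in lst_next_loc:
--         next_paths = find_length_n_paths_helper(n - 1, board, words, next_loc)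
--         new_next_path = []
--         for path in next_paths:
--             new_next_path.append([loc] + path)
--         lst_to_return.extend(new_next_path)
--     return lst_to_return
-- ===== SOURCE B (Python) =====
-- def find_length_n_paths_helper(n, board, words, loc):
--     paths = [[(loc[0], loc[1])]]
--     for _ in range(n - 1):
--         height, width = len(board), len(board[0])
--         new_paths = []
--         for path in paths:
--             y, x = path[-1]
--             for j in (-1, 0, 1):
--                 for i in (-1, 0, 1):
--                     if (i, j) == (0, 0):
--                         continue
--                     if (x == 0 and j == -1) or (x == width - 1 and j == 1):
--                         continue
--                     if (y == 0 and i == -1) or (y == height - 1 and i == 1):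
--                         continue
--                     new_paths.append(path + [(y + i, x + j)])
--         paths = new_paths
--     return paths
-- ===== Notes on version B (the rewrite author's own statement) =====
-- stated objective: alternative
-- what changed: The recursive DFS with a build-then-remove neighbour list is replaced by an iterative level-by-level extension of partial paths with a filtered neighbour comprehension, preserving the output order; Pre_ excludes n <= 0 (A recurses forever, RecursionError) and empty boards with n >= 2 (A's len(board[0]) raises IndexError).
-- intended difference: On boards with exactly one row or one column, when n >= 2 and the start cell is within n-2 steps of the degenerate border, A's if/elif border trimming drops only one side and A returns paths that step off the board, while B returns only on-board walks, the intended behaviour. — e.g. on find_length_n_paths_helper(2, [["a"]], [], (0, 0)): A returns [[(0, 0), (1, 0)], [(0, 0), (0, 1)], [(0, 0), (1, 1)]], B returns []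
import Mathlib
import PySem

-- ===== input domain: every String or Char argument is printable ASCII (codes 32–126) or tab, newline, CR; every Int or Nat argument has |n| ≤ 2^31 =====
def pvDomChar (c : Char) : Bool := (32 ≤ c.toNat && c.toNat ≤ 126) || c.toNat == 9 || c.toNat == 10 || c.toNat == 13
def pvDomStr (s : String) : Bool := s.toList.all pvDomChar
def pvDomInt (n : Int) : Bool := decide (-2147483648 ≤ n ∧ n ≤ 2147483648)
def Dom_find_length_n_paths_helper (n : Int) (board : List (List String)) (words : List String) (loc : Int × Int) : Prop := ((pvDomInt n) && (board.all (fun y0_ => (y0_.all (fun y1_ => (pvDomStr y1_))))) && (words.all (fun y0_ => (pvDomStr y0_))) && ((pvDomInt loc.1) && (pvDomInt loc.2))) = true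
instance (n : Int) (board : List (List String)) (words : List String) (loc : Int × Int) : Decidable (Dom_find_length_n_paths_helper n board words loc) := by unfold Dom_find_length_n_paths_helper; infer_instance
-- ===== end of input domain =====

-- B replaces A's recursive DFS by an iterative level-by-level path extension with a
-- filtered neighbour comprehension (alternative decomposition, same output order);
-- on 1-row/1-column boards B keeps walks on the board where A steps off (see D_ below).

-- ===== PORT A =====
-- list.remove(v); at every call site in this program the removed element is present,
-- so the getD default (Python: ValueError) is never taken
def pyRemove (l : List (Int × Int)) (v : Int × Int) : List (Int × Int) :=
  (PySem.List.remove? l v).getD l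

def get_valid_next_locations (location : Int × Int) (path : List (Int × Int))
    (height width : Int) : List (Int × Int) :=
  let y := location.1
  let x := location.2
  let nl := (PySem.List.pyRange (-1) 2 1).flatMap
      (fun j => (PySem.List.pyRange (-1) 2 1).map (fun i => (y + i, x + j)))
  let nl := pyRemove nl (y, x)
  let nl :=
    if x = 0 then pyRemove (pyRemove (pyRemove nl (y - 1, x - 1)) (y, x - 1)) (y + 1, x - 1)
    else if x = width - 1 then
      pyRemove (pyRemove (pyRemove nl (y - 1, x + 1)) (y, x + 1)) (y + 1, x + 1)
    else nl
  let nl :=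
    if y = 0 then
      let nl := if (y - 1, x - 1) ∈ nl then pyRemove nl (y - 1, x - 1) else nl
      let nl := if (y - 1, x) ∈ nl then pyRemove nl (y - 1, x) else nl
      if (y - 1, x + 1) ∈ nl then pyRemove nl (y - 1, x + 1) else nl
    else if y = height - 1 then
      let nl := if (y + 1, x - 1) ∈ nl then pyRemove nl (y + 1, x - 1) else nl
      let nl := if (y + 1, x) ∈ nl then pyRemove nl (y + 1, x) else nl
      if (y + 1, x + 1) ∈ nl then pyRemove nl (y + 1, x + 1) else nl
    else nl
  -- 'for path_loc in path: … remove' — path is the empty tuple () at every call site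
  path.foldl (fun acc p => if p ∈ acc then pyRemove acc p else acc) nl

-- A's recursion, fuelled by n.toNat (structural recursion artifact only: for n ≤ 0
-- Python recurses forever — RecursionError — and those inputs are outside Pre_;
-- the n == 1 test is checked first in both branches, exactly as in the Python)
def fA : Nat → Int → List (List String) → List String → (Int × Int) → List (List (Int × Int))
  | 0, n, _, _, loc => if n = 1 then [[(loc.1, loc.2)]] else []
  | fuel' + 1, n, board, words, loc =>
    if n = 1 then [[(loc.1, loc.2)]]
    else
      (get_valid_next_locations loc [] (board.length : Int)
          (((PySem.List.pyGet? board 0).getD []).length : Int)).foldl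
        (fun acc next_loc =>
          acc ++ (fA fuel' (n - 1) board words next_loc).map (fun p => loc :: p)) []

def find_length_n_paths_helper (n : Int) (board : List (List String)) (words : List String) (loc : Int × Int) : List (List (Int × Int)) :=
  fA n.toNat n board words loc

-- ===== PORT B =====
def nbrsB (y x h w : Int) : List (Int × Int) :=
  [(-1 : Int), 0, 1].flatMap (fun j => [(-1 : Int), 0, 1].filterMap (fun i =>
    if i = 0 ∧ j = 0 then none
    else if (x = 0 ∧ j = -1) ∨ (x = w - 1 ∧ j = 1) then none
    else if (y = 0 ∧ i = -1) ∨ (y = h - 1 ∧ i = 1) then none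
    else some (y + i, x + j)))

def stepB (board : List (List String)) (paths : List (List (Int × Int))) :
    List (List (Int × Int)) :=
  paths.foldl (fun acc p =>
    -- p[-1]; p is never empty in B's loop, so the getD default is never taken
    let last := (PySem.List.pyGet? p (-1)).getD (0, 0)
    acc ++ (nbrsB last.1 last.2 (board.length : Int)
        (((PySem.List.pyGet? board 0).getD []).length : Int)).map (fun nl => p ++ [nl])) []

def find_length_n_paths_helper_alt (n : Int) (board : List (List String)) (words : List String) (loc : Int × Int) : List (List (Int × Int)) :=
  (List.range (n - 1).toNat).foldl (fun paths _ => stepB board paths) [[(loc.1, loc.2)]]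

-- ===== PRECONDITION & SPEC =====
-- Pre_ excludes n ≤ 0 (A recurses forever: RecursionError) and board = [] with n ≥ 2
-- (A's len(board[0]) raises IndexError); everywhere else A returns normally.
def Pre_find_length_n_paths_helper (n : Int) (board : List (List String)) (words : List String) (loc : Int × Int) : Prop :=
  1 ≤ n ∧ (n = 1 ∨ board ≠ [])
instance (n : Int) (board : List (List String)) (words : List String) (loc : Int × Int) : Decidable (Pre_find_length_n_paths_helper n board words loc) := by unfold Pre_find_length_n_paths_helper; infer_instance

def pvWitness_find_length_n_paths_helper : Int × List (List String) × List String × (Int × Int) :=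
  (2, [["a"], ["b"]], [], (0, 0))

-- On boards with exactly one row or one column, when n ≥ 2 and the start cell is within
-- n-2 steps of the degenerate border, A's if/elif border trimming drops only one side and
-- A returns paths that step off the board, while B returns only on-board walks, the
-- intended behaviour.
def D_find_length_n_paths_helper (n : Int) (board : List (List String)) (words : List String) (loc : Int × Int) : Prop :=
  2 ≤ n ∧ board ≠ [] ∧
    (((board.headD []).length = 1 ∧ |loc.2| ≤ n - 2) ∨ (board.length = 1 ∧ |loc.1| ≤ n - 2))
instance (n : Int) (board : List (List String)) (words : List String) (loc : Int × Int) : Decidable (D_find_length_n_paths_helper n board words loc) := by unfold D_find_length_n_paths_helper; infer_instance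

def Spec_find_length_n_paths_helper (n : Int) (board : List (List String)) (words : List String) (loc : Int × Int) (out : List (List (Int × Int))) : Prop := ¬ D_find_length_n_paths_helper n board words loc → out = find_length_n_paths_helper_alt n board words loc
instance (n : Int) (board : List (List String)) (words : List String) (loc : Int × Int) (out : List (List (Int × Int))) : Decidable (Spec_find_length_n_paths_helper n board words loc out) := by unfold Spec_find_length_n_paths_helper; infer_instance

def pvDiffWitness_find_length_n_paths_helper : Int × List (List String) × List String × (Int × Int) :=
  (2, [["a"]], [], (0, 0))
def pvDiffWitnessOut_find_length_n_paths_helper : (List (List (Int × Int))) × (List (List (Int × Int))) :=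
  ([[(0, 0), (1, 0)], [(0, 0), (0, 1)], [(0, 0), (1, 1)]], [])

-- ===== CLAIM (what is proved, stated in full; the proofs are below) =====
def Claim_unchanged_find_length_n_paths_helper : Prop := ∀ (n : Int) (board : List (List String)) (words : List String) (loc : Int × Int), Dom_find_length_n_paths_helper n board words loc → Pre_find_length_n_paths_helper n board words loc → Spec_find_length_n_paths_helper n board words loc (find_length_n_paths_helper n board words loc)
def Claim_changed_find_length_n_paths_helper : Prop := Dom_find_length_n_paths_helper (pvDiffWitness_find_length_n_paths_helper.1) (pvDiffWitness_find_length_n_paths_helper.2.1) (pvDiffWitness_find_length_n_paths_helper.2.2.1) (pvDiffWitness_find_length_n_paths_helper.2.2.2) ∧ Pre_find_length_n_paths_helper (pvDiffWitness_find_length_n_paths_helper.1) (pvDiffWitness_find_length_n_paths_helper.2.1) (pvDiffWitness_find_length_n_paths_helper.2.2.1) (pvDiffWitness_find_length_n_paths_helper.2.2.2) ∧ D_find_length_n_paths_helper (pvDiffWitness_find_length_n_paths_helper.1) (pvDiffWitness_find_length_n_paths_helper.2.1) (pvDiffWitness_find_length_n_paths_helper.2.2.1) (pvDiffWitness_find_length_n_paths_helper.2.2.2)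 ∧ find_length_n_paths_helper (pvDiffWitness_find_length_n_paths_helper.1) (pvDiffWitness_find_length_n_paths_helper.2.1) (pvDiffWitness_find_length_n_paths_helper.2.2.1) (pvDiffWitness_find_length_n_paths_helper.2.2.2) = pvDiffWitnessOut_find_length_n_paths_helper.1 ∧ find_length_n_paths_helper_alt (pvDiffWitness_find_length_n_paths_helper.1) (pvDiffWitness_find_length_n_paths_helper.2.1) (pvDiffWitness_find_length_n_paths_helper.2.2.1) (pvDiffWitness_find_length_n_paths_helper.2.2.2) = pvDiffWitnessOut_find_length_n_paths_helper.2 ∧ pvDiffWitnessOut_find_length_n_paths_helper.1 ≠ pvDiffWitnessOut_find_length_n_paths_helper.2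

-- ===== LEMMAS AND PROOFS =====

-- the common reference shape: the tree of length-k forward extensions from loc
def W (bd : List (List String)) : Nat → (Int × Int) → List (List (Int × Int))
  | 0, loc => [[loc]]
  | k + 1, loc =>
    (nbrsB loc.1 loc.2 (bd.length : Int)
        (((PySem.List.pyGet? bd 0).getD []).length : Int)).flatMap
      (fun nl => (W bd k nl).map (loc :: ·))

-- one path's extensions, as B's stepB produces them
def gB (bd : List (List String)) (p : List (Int × Int)) : List (List (Int × Int)) :=
  (nbrsB ((PySem.List.pyGet? p (-1)).getD (0, 0)).1 ((PySem.List.pyGet? p (-1)).getD (0, 0)).2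
      (bd.length : Int) (((PySem.List.pyGet? bd 0).getD []).length : Int)).map (fun nl => p ++ [nl])

-- A's remove-based neighbour list equals B's filtered comprehension away from the
-- degenerate double-border cells
theorem nbrs_eq (y x h w : Int) (hx : ¬(x = 0 ∧ x = w - 1)) (hy : ¬(y = 0 ∧ y = h - 1)) :
    get_valid_next_locations (y, x) [] h w = nbrsB y x h w := by
  have hr : (PySem.List.pyRange (-1) 2 1) = [-1, 0, 1] := by decide
  by_cases hx0 : x = 0
  · subst hx0
    have hxw : ¬((0 : Int) = w + -1) := fun h' => hx ⟨rfl, by omega⟩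
    by_cases hy0 : y = 0
    · subst hy0
      have hyh : ¬((0 : Int) = h + -1) := fun h' => hy ⟨rfl, by omega⟩
      simp [get_valid_next_locations, nbrsB, pyRemove, hr, hxw, hyh,
        PySem.List.remove?_cons_of_ne, PySem.List.remove?_cons_self, sub_eq_add_neg,
        Prod.ext_iff, List.filterMap_cons]
    · by_cases hyh : y = h + -1
      · obtain rfl : h = y + 1 := by omega
        simp [get_valid_next_locations, nbrsB, pyRemove, hr, hxw, hy0,
          PySem.List.remove?_cons_of_ne, PySem.List.remove?_cons_self, sub_eq_add_neg,
          Prod.ext_iff, List.filterMap_cons]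
      · simp [get_valid_next_locations, nbrsB, pyRemove, hr, hxw, hy0, hyh,
          PySem.List.remove?_cons_of_ne, PySem.List.remove?_cons_self, sub_eq_add_neg,
          Prod.ext_iff, List.filterMap_cons]
  · by_cases hxw : x = w + -1
    · obtain rfl : w = x + 1 := by omega
      by_cases hy0 : y = 0
      · subst hy0
        have hyh : ¬((0 : Int) = h + -1) := fun h' => hy ⟨rfl, by omega⟩
        simp [get_valid_next_locations, nbrsB, pyRemove, hr, hx0, hyh,
          PySem.List.remove?_cons_of_ne, PySem.List.remove?_cons_self, sub_eq_add_neg,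
          Prod.ext_iff, List.filterMap_cons]
      · by_cases hyh : y = h + -1
        · obtain rfl : h = y + 1 := by omega
          simp [get_valid_next_locations, nbrsB, pyRemove, hr, hx0, hy0,
            PySem.List.remove?_cons_of_ne, PySem.List.remove?_cons_self, sub_eq_add_neg,
            Prod.ext_iff, List.filterMap_cons]
        · simp [get_valid_next_locations, nbrsB, pyRemove, hr, hx0, hy0, hyh,
            PySem.List.remove?_cons_of_ne, PySem.List.remove?_cons_self, sub_eq_add_neg,
            Prod.ext_iff, List.filterMap_cons]
    · by_cases hy0 : y = 0
      · subst hy0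
        have hyh : ¬((0 : Int) = h + -1) := fun h' => hy ⟨rfl, by omega⟩
        simp [get_valid_next_locations, nbrsB, pyRemove, hr, hx0, hxw, hyh,
          PySem.List.remove?_cons_of_ne, PySem.List.remove?_cons_self, sub_eq_add_neg,
          Prod.ext_iff, List.filterMap_cons]
      · by_cases hyh : y = h + -1
        · obtain rfl : h = y + 1 := by omega
          simp [get_valid_next_locations, nbrsB, pyRemove, hr, hx0, hxw, hy0,
            PySem.List.remove?_cons_of_ne, PySem.List.remove?_cons_self, sub_eq_add_neg,
            Prod.ext_iff, List.filterMap_cons]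
        · simp [get_valid_next_locations, nbrsB, pyRemove, hr, hx0, hxw, hy0, hyh,
            PySem.List.remove?_cons_of_ne, PySem.List.remove?_cons_self, sub_eq_add_neg,
            Prod.ext_iff, List.filterMap_cons]

theorem mem_nbrsB (y x h w : Int) (nl : Int × Int) (hm : nl ∈ nbrsB y x h w) :
    (nl.1 = y - 1 ∨ nl.1 = y ∨ nl.1 = y + 1) ∧ (nl.2 = x - 1 ∨ nl.2 = x ∨ nl.2 = x + 1) := by
  simp only [nbrsB, List.mem_flatMap, List.mem_filterMap, List.mem_cons,
    List.not_mem_nil, or_false] at hm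
  obtain ⟨j, hj, i, hi, hsome⟩ := hm
  have hnl : nl = (y + i, x + j) := by split_ifs at hsome <;> simp_all
  subst hnl
  refine ⟨?_, ?_⟩ <;> simp <;> omega

theorem abs_step (a b : Int) (k : Nat) (h : (k : Int) + 1 ≤ |a|)
    (hb : b = a - 1 ∨ b = a ∨ b = a + 1) : (k : Int) ≤ |b| := by
  rcases abs_cases a with ⟨h1, h2⟩ | ⟨h1, h2⟩ <;>
    rcases abs_cases b with ⟨g1, g2⟩ | ⟨g1, g2⟩ <;> omega

theorem flatMap_congr' {α β : Type} (l : List α) (f g : α → List β)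
    (h : ∀ a ∈ l, f a = g a) : l.flatMap f = l.flatMap g := by
  induction l with
  | nil => rfl
  | cons a l ih => simp only [List.flatMap_cons, h a (by simp), ih (fun b hb => h b (by simp [hb]))]

theorem stepB_eq_flatMap (bd : List (List String)) (ps : List (List (Int × Int))) :
    stepB bd ps = ps.flatMap (gB bd) := by
  simp only [stepB]
  rw [PySem.List.foldl_append_eq_flatMap]
  simp only [List.nil_append]
  rfl

theorem gB_cons (bd : List (List String)) (a : Int × Int) (p : List (Int × Int)) (hp : p ≠ []) :
    gB bd (a :: p) = (gB bd p).map (a :: ·) := by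
  obtain ⟨b, l, rfl⟩ := List.exists_cons_of_ne_nil hp
  simp [gB, PySem.List.pyGet?_neg_one, List.getLast?_cons_cons, List.map_map, Function.comp]

theorem mem_stepB_ne_nil (bd : List (List String)) (ps : List (List (Int × Int)))
    (q : List (Int × Int)) (hq : q ∈ stepB bd ps) : q ≠ [] := by
  rw [stepB_eq_flatMap] at hq
  simp only [List.mem_flatMap, gB, List.mem_map] at hq
  obtain ⟨p, -, nl, -, rfl⟩ := hq
  simp

theorem stepB_map_cons (bd : List (List String)) (a : Int × Int)
    (ps : List (List (Int × Int))) (hne : ∀ p ∈ ps, p ≠ []) :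
    stepB bd (ps.map (a :: ·)) = (stepB bd ps).map (a :: ·) := by
  induction ps with
  | nil => simp [stepB_eq_flatMap]
  | cons p ps ih =>
    simp only [List.map_cons, stepB_eq_flatMap, List.flatMap_cons, List.map_append] at *
    rw [gB_cons bd a p (hne p (by simp))]
    rw [ih (fun q hq => hne q (by simp [hq]))]

theorem stepB_append (bd : List (List String)) (ps qs : List (List (Int × Int))) :
    stepB bd (ps ++ qs) = stepB bd ps ++ stepB bd qs := by
  simp [stepB_eq_flatMap]

theorem iter_nil (bd : List (List String)) (k : Nat) : (stepB bd)^[k] [] = [] := by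
  induction k with
  | zero => rfl
  | succ k ih => rw [Function.iterate_succ_apply]; exact (by rfl : stepB bd [] = []) ▸ ih

theorem iter_append (bd : List (List String)) (k : Nat) :
    ∀ ps qs, (stepB bd)^[k] (ps ++ qs) = (stepB bd)^[k] ps ++ (stepB bd)^[k] qs := by
  induction k with
  | zero => intro ps qs; rfl
  | succ k ih => intro ps qs; simp only [Function.iterate_succ_apply, stepB_append, ih]

theorem iter_map_cons (bd : List (List String)) (a : Int × Int) (k : Nat) :
    ∀ ps, (∀ p ∈ ps, p ≠ []) →
      (stepB bd)^[k] (ps.map (a :: ·)) = ((stepB bd)^[k] ps).map (a :: ·) := by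
  induction k with
  | zero => intro ps _; rfl
  | succ k ih =>
    intro ps hne
    simp only [Function.iterate_succ_apply]
    rw [stepB_map_cons bd a ps hne, ih _ (fun q hq => mem_stepB_ne_nil bd ps q hq)]

theorem iter_flatMap (bd : List (List String)) (k : Nat) {α : Type}
    (l : List α) (g : α → List (List (Int × Int))) :
    (stepB bd)^[k] (l.flatMap g) = l.flatMap (fun x => (stepB bd)^[k] (g x)) := by
  induction l with
  | nil => simp [iter_nil]
  | cons x l ih => simp only [List.flatMap_cons, iter_append, ih]

theorem iter_eq_W (bd : List (List String)) :
    ∀ (k : Nat) (loc : Int × Int), (stepB bd)^[k] [[loc]] = W bd k loc := by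
  intro k
  induction k with
  | zero => intro loc; rfl
  | succ k ih =>
    intro loc
    rw [Function.iterate_succ_apply]
    have h1 : stepB bd [[loc]] =
        (nbrsB loc.1 loc.2 (bd.length : Int)
          (((PySem.List.pyGet? bd 0).getD []).length : Int)).flatMap (fun nl => [[loc, nl]]) := by
      rw [← List.map_eq_flatMap]
      simp [stepB_eq_flatMap, gB, PySem.List.pyGet?_neg_one]
    rw [h1, iter_flatMap]
    have h2 : ∀ nl : Int × Int, (stepB bd)^[k] [[loc, nl]] = ((stepB bd)^[k] [[nl]]).map (loc :: ·) := by
      intro nl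
      have := iter_map_cons bd loc k [[nl]] (by simp)
      simpa using this
    simp only [h2, ih]
    rfl

-- A equals the reference tree W as long as, on a 1-column (resp. 1-row) board, the
-- start column (resp. row) is at least k steps away from 0
theorem fA_eq_W (bd : List (List String)) (words : List String) :
    ∀ (k fuel : Nat) (n : Int) (loc : Int × Int), n = (k : Int) + 1 → k ≤ fuel →
      ((((PySem.List.pyGet? bd 0).getD []).length : Int) = 1 → (k : Int) ≤ |loc.2|) →
      ((bd.length : Int) = 1 → (k : Int) ≤ |loc.1|) →
      fA fuel n bd words loc = W bd k loc := by
  intro k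
  induction k with
  | zero =>
    intro fuel n loc hn _ _ _
    subst hn
    cases fuel <;> simp [fA, W]
  | succ k ih =>
    intro fuel n loc hn hf hw hh
    obtain ⟨f', rfl⟩ : ∃ f', fuel = f' + 1 := ⟨fuel - 1, by omega⟩
    obtain ⟨ly, lx⟩ := loc
    set w : Int := (((PySem.List.pyGet? bd 0).getD []).length : Int) with hwdef
    set h : Int := ((bd.length : Int)) with hhdef
    rw [fA]
    rw [if_neg (by push_cast at hn ⊢; omega)]
    rw [PySem.List.foldl_append_eq_flatMap]
    rw [List.nil_append]
    have hx' : ¬(lx = 0 ∧ lx = w - 1) := by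
      rintro ⟨rfl, hww⟩
      have := hw (by omega)
      simp at this
      omega
    have hy' : ¬(ly = 0 ∧ ly = h - 1) := by
      rintro ⟨rfl, hhh⟩
      have := hh (by omega)
      simp at this
      omega
    rw [nbrs_eq ly lx h w hx' hy']
    rw [W]
    apply flatMap_congr'
    intro nl hnl
    have hb := mem_nbrsB ly lx h w nl hnl
    have hrec : fA f' (n - 1) bd words nl = W bd k nl := by
      apply ih f' (n - 1) nl (by omega) (by omega)
      · intro hw1
        exact abs_step lx nl.2 k (hw hw1) hb.2
      · intro hh1
        exact abs_step ly nl.1 k (hh hh1) hb.1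
    rw [hrec]

theorem foldl_range_iterate {α : Type} (f : α → α) :
    ∀ (k : Nat) (init : α), (List.range k).foldl (fun s _ => f s) init = f^[k] init := by
  intro k
  induction k with
  | zero => intro init; rfl
  | succ k ih =>
    intro init
    rw [List.range_succ, List.foldl_append, ih, Function.iterate_succ_apply']
    rfl

theorem headD_eq_pyGet (bd : List (List String)) (hne : bd ≠ []) :
    (PySem.List.pyGet? bd 0).getD [] = bd.headD [] := by
  cases bd with
  | nil => simp at hne
  | cons b t => simp [PySem.List.pyGet?, PySem.List.pyIdx?]

-- ===== VERDICT (by name: the statement is the Claim_ definition above) =====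
theorem find_length_n_paths_helper_spec : Claim_unchanged_find_length_n_paths_helper := by
  intro n board words loc _ hpre
  obtain ⟨h1, h2⟩ := hpre
  unfold Spec_find_length_n_paths_helper
  intro hnd
  unfold find_length_n_paths_helper find_length_n_paths_helper_alt
  by_cases hn1 : n = 1
  · subst hn1
    rw [fA_eq_W board words 0 (Int.toNat 1) 1 loc (by norm_num) (by omega) (by simp) (by simp)]
    have h0 : ((1 : Int) - 1).toNat = 0 := by norm_num
    rw [h0, foldl_range_iterate]
    exact (iter_eq_W board 0 loc).symm
  · have hbne : board ≠ [] := by tauto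
    have hD : ¬(((board.headD []).length = 1 ∧ |loc.2| ≤ n - 2) ∨
        (board.length = 1 ∧ |loc.1| ≤ n - 2)) := by
      intro hd
      exact hnd ⟨by omega, hbne, hd⟩
    push_neg at hD
    rw [fA_eq_W board words (n - 1).toNat n.toNat n loc (by omega) (by omega) ?_ ?_]
    · rw [foldl_range_iterate]
      exact (iter_eq_W board (n - 1).toNat loc).symm
    · intro hw1
      rw [headD_eq_pyGet board hbne] at hw1
      have := hD.1 (by exact_mod_cast hw1)
      omega
    · intro hh1
      have := hD.2 (by exact_mod_cast hh1)
      omega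

theorem find_length_n_paths_helper_changed : Claim_changed_find_length_n_paths_helper := by
  unfold Claim_changed_find_length_n_paths_helper; decide
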